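-- pv_equiv track=rewrite | github.com/miliar/Code_Jam_Webscraper | solutions_python/Problem_96/1612.py | surprise
-- ===== SOURCE A (Python) =====
-- def surprise(scores, threshold, surpriseScores):
--     #print 'Surprise',scores , "Threshold",threshold
--     solution = 0
--     surprisesFound = 0
--     for num in scores:
--         breakdown = []
--         avg = num//3
--         if(num%3 == 0 and num//3 >= threshold):
--             breakdown = [num//3] * 3
--             solution = solution +1
--             #print breakdown , "solution" , solution
--         else:
--             breakdown = [threshold, num//3 , num//3]
--             while( sum(breakdown) != num):
--                 if(sum(breakdown) < num):
--                     minval = min(breakdown)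
--                     minval = minval + 1
--                     breakdown.remove(min(breakdown))
--                     breakdown.append(minval)
--                 if(sum(breakdown) > num):
--                     minval = min(breakdown[1:])
--                     minval = minval - 1
--                     breakdown.remove(min(breakdown[1:]))
--                     breakdown.append(minval)
--             if [x for x in breakdown if x < 0 or x <(threshold-2)]:
--                 pass
--                 #print breakdown, " Not a solution"
--             elif [x for x in breakdown if x <(threshold-1)]:
--                 if(surprisesFound >= surpriseScores):
--                     pass
--                     #print breakdown,'cannot count this surprise solution'
--                 else:
--                     solution = solution +1
--                     surprisesFound = surprisesFound + 1
--                     #print breakdown, 'surprise!', "solution", solution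
--             else:
--                 solution = solution + 1
--                 #print breakdown ,'normal solution', solution
--     return solution
-- ===== SOURCE B (Python) =====
-- def surprise(scores, threshold, surpriseScores):
--     count = 0
--     budget = surpriseScores
--     for num in scores:
--         if num % 3 == 0 and num // 3 >= threshold:
--             count += 1
--         elif num >= 3 * threshold - 2 and num >= 1:
--             count += 1
--         elif budget > 0 and num >= 2 and num in (3 * threshold - 4, 3 * threshold - 3):
--             count += 1
--             budget -= 1
--     return count
-- ===== Notes on version B (the rewrite author's own statement) =====
-- stated objective: faster
-- what changed: B replaces A's per-score simulation loop (repeatedly incrementing/decrementing the minimum of a 3-element breakdown until it sums to the score) with a closed-form arithmetic test per score: count without surprise iff the score is an exact multiple 3*k with k>=threshold or score>=max(3*threshold-2,1), and spend one surprise iff score>=2 and score is 3*threshold-4 or 3*threshold-3.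
import Mathlib
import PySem

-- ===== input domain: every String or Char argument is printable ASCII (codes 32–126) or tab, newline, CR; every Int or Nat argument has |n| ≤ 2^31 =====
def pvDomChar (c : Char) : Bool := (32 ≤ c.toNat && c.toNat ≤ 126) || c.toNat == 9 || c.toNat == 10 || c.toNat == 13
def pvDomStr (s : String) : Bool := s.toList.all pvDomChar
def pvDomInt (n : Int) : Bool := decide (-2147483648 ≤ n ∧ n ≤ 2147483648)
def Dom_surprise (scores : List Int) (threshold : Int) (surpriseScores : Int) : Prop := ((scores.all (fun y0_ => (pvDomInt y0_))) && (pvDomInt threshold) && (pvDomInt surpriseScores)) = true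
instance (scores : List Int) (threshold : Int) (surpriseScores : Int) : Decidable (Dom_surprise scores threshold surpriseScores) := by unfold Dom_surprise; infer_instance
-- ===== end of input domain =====

-- B replaces A's per-score breakdown-adjustment simulation by a closed-form O(1) arithmetic
-- test per score (a timing run measures B faster; A's loop runs ~|score-threshold| steps).

-- ===== PORT A =====
-- Python min(xs): raises on []; A only applies it to lists of length 3 resp. 2, so the
-- default 0 is never used on reachable states.
def pyMinA (l : List Int) : Int := (PySem.List.min? l (fun y => y)).getD 0
-- Python xs.remove(v): raises if v is absent; A removes a minimum, which is present.
def pyRemoveA (l : List Int) (v : Int) : List Int := (PySem.List.remove? l v).getD l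

-- A's while loop; each iteration moves sum(breakdown) by exactly 1 towards num, so the
-- fuel (num - sum b).natAbs supplied at the call site is exactly the number of iterations.
def surpriseWhile (num : Int) (fuel : Nat) (b : List Int) : List Int :=
  match fuel with
  | 0 => b
  | Nat.succ f =>
    if b.sum ≠ num then
      let b1 :=
        if b.sum < num then
          let minval := pyMinA b + 1
          pyRemoveA b (pyMinA b) ++ [minval]
        else b
      let b2 :=
        if b1.sum > num then
          let minval := pyMinA (PySem.List.slice b1 (some 1) none) - 1
          pyRemoveA b1 (pyMinA (PySem.List.slice b1 (some 1) none)) ++ [minval]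
        else b1
      surpriseWhile num f b2
    else b

def surprise (scores : List Int) (threshold : Int) (surpriseScores : Int) : Int :=
  (scores.foldl (fun (st : Int × Int) num =>
      let solution := st.1
      let surprisesFound := st.2
      if PySem.Int.mod num 3 = 0 ∧ threshold ≤ PySem.Int.floordiv num 3 then
        (solution + 1, surprisesFound)
      else
        let b0 : List Int := [threshold, PySem.Int.floordiv num 3, PySem.Int.floordiv num 3]
        let b := surpriseWhile num (num - b0.sum).natAbs b0
        if (b.filter fun x => decide (x < 0 ∨ x < threshold - 2)) ≠ [] then
          (solution, surprisesFound)
        else if (b.filter fun x => decide (x < threshold - 1)) ≠ [] then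
          if surprisesFound ≥ surpriseScores then (solution, surprisesFound)
          else (solution + 1, surprisesFound + 1)
        else (solution + 1, surprisesFound))
    (0, 0)).1

-- ===== PORT B =====
def surprise_alt (scores : List Int) (threshold : Int) (surpriseScores : Int) : Int :=
  (scores.foldl (fun (st : Int × Int) num =>
      let count := st.1
      let budget := st.2
      if PySem.Int.mod num 3 = 0 ∧ threshold ≤ PySem.Int.floordiv num 3 then
        (count + 1, budget)
      else if 3 * threshold - 2 ≤ num ∧ 1 ≤ num then
        (count + 1, budget)
      else if 0 < budget ∧ 2 ≤ num ∧ (num = 3 * threshold - 4 ∨ num = 3 * threshold - 3) then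
        (count + 1, budget - 1)
      else
        (count, budget))
    (0, surpriseScores)).1

-- ===== PRECONDITION & SPEC =====
def Spec_surprise (scores : List Int) (threshold : Int) (surpriseScores : Int) (out : Int) : Prop := out = surprise_alt scores threshold surpriseScores
instance (scores : List Int) (threshold : Int) (surpriseScores : Int) (out : Int) : Decidable (Spec_surprise scores threshold surpriseScores out) := by unfold Spec_surprise; infer_instance

-- ===== CLAIM (what is proved, stated in full; the proofs are below) =====
def Claim_equal_surprise : Prop := ∀ (scores : List Int) (threshold : Int) (surpriseScores : Int), Dom_surprise scores threshold surpriseScores → Spec_surprise scores threshold surpriseScores (surprise scores threshold surpriseScores)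

-- ===== LEMMAS AND PROOFS =====

theorem pyMinA_pair (x y : Int) : pyMinA [x, y] = min x y := by
  simp [pyMinA, PySem.List.min?_id_cons, List.foldl]

theorem pyMinA_triple (x y z : Int) : pyMinA [x, y, z] = min (min x y) z := by
  simp [pyMinA, PySem.List.min?_id_cons, List.foldl]

theorem pyRemoveA3_first (x y z : Int) : pyRemoveA [x, y, z] x = [y, z] := by
  simp [pyRemoveA, PySem.List.remove?_cons_self]

theorem pyRemoveA3_second (x y z : Int) (hx : x ≠ y) : pyRemoveA [x, y, z] y = [x, z] := by
  simp [pyRemoveA, PySem.List.remove?_cons_of_ne _ hx, PySem.List.remove?_cons_self]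

theorem pyRemoveA3_third (x y z : Int) (hx : x ≠ z) (hy : y ≠ z) :
    pyRemoveA [x, y, z] z = [x, y] := by
  simp [pyRemoveA, PySem.List.remove?_cons_of_ne _ hx, PySem.List.remove?_cons_of_ne _ hy,
    PySem.List.remove?_cons_self]

theorem sliceTail3 (x y z : Int) :
    PySem.List.slice ([x, y, z] : List Int) (some 1) none = [y, z] := by
  simpa using PySem.List.slice_from_natCast (xs := ([x, y, z] : List Int)) (a := 1)

-- decrement phase: from [t, a, a - j] the loop lowers the last element down to 2a+r-t
theorem surpriseWhile_dec (t a r num : Int) (hnum : num = 3 * a + r)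
    (hr0 : 0 ≤ r) (hr2 : r < 3) (ht : a + r + 1 ≤ t) :
    ∀ (m : Nat) (j : Int), 0 ≤ j → j + m = t - a - r →
      surpriseWhile num m [t, a, a - j] = [t, a, 2 * a + r - t] := by
  intro m
  induction m with
  | zero =>
    intro j hj hjm
    have hv : a - j = 2 * a + r - t := by omega
    rw [surpriseWhile, hv]
  | succ f ih =>
    intro j hj hjm
    rw [surpriseWhile]
    simp only [if_pos (by simp; omega : ([t, a, a - j] : List Int).sum ≠ num),
      if_neg (by simp; omega : ¬ ([t, a, a - j] : List Int).sum < num), sliceTail3]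
    have hmin : pyMinA [a, a - j] = a - j := by rw [pyMinA_pair]; omega
    have hrm : pyRemoveA [t, a, a - j] (a - j) = [t, a] := by
      by_cases hj0 : j = 0
      · subst hj0
        simpa using pyRemoveA3_second t a a (by omega)
      · exact pyRemoveA3_third t a (a - j) (by omega) (by omega)
    simp only [hmin, hrm]
    simp only [if_pos (by simp; omega : num < ([t, a, a - j] : List Int).sum)]
    have heq : ([t, a] ++ [a - j - 1] : List Int) = [t, a, a - (j + 1)] := by simp; omega
    rw [heq]
    exact ih (j + 1) (by omega) (by omega)

-- levelling phase: from [a, a, a] the loop distributes the remainder r ∈ {1, 2}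
theorem surpriseWhile_lvl (a r num : Int) (hnum : num = 3 * a + r)
    (hr : r = 1 ∨ r = 2) :
    surpriseWhile num r.toNat [a, a, a] =
      (if r = 1 then [a, a, a + 1] else [a, a + 1, a + 1]) := by
  rcases hr with h | h <;> subst h
  · rw [if_pos rfl, show ((1 : Int).toNat) = 1 from rfl, surpriseWhile]
    simp only [if_pos (by simp; omega : ([a, a, a] : List Int).sum ≠ num),
      if_pos (by simp; omega : ([a, a, a] : List Int).sum < num),
      pyMinA_triple, min_self, pyRemoveA3_first]
    simp only [if_neg (by simp; omega : ¬ num < ([a, a] ++ [a + 1] : List Int).sum)]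
    rw [surpriseWhile]
    simp
  · rw [if_neg (by norm_num), show ((2 : Int).toNat) = 2 from rfl, surpriseWhile]
    simp only [if_pos (by simp; omega : ([a, a, a] : List Int).sum ≠ num),
      if_pos (by simp; omega : ([a, a, a] : List Int).sum < num),
      pyMinA_triple, min_self, pyRemoveA3_first]
    simp only [if_neg (by simp; omega : ¬ num < ([a, a] ++ [a + 1] : List Int).sum)]
    have heq : ([a, a] ++ [a + 1] : List Int) = [a, a, a + 1] := by simp
    rw [heq, surpriseWhile]
    simp only [if_pos (by simp; omega : ([a, a, a + 1] : List Int).sum ≠ num),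
      if_pos (by simp; omega : ([a, a, a + 1] : List Int).sum < num)]
    have hmin : pyMinA [a, a, a + 1] = a := by rw [pyMinA_triple]; omega
    simp only [hmin, pyRemoveA3_first]
    simp only [if_neg (by simp; omega : ¬ num < ([a, a + 1] ++ [a + 1] : List Int).sum)]
    have heq2 : ([a, a + 1] ++ [a + 1] : List Int) = [a, a + 1, a + 1] := by simp
    rw [heq2, surpriseWhile]

-- raising phase: from [a, a, t + j] with t + j ≤ a the loop raises the last element to a,
-- then levels the remainder
theorem surpriseWhile_raise (t a r num : Int) (hnum : num = 3 * a + r)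
    (hr : r = 1 ∨ r = 2) :
    ∀ (m : Nat) (j : Int), t + j ≤ a → (m : Int) = (a - t - j) + r →
      surpriseWhile num m [a, a, t + j] =
        (if r = 1 then [a, a, a + 1] else [a, a + 1, a + 1]) := by
  intro m
  induction m with
  | zero => intro j h1 h2; omega
  | succ f ih =>
    intro j h1 h2
    by_cases hja : t + j = a
    · rw [hja]
      have hfr : f + 1 = r.toNat := by omega
      rw [hfr]
      exact surpriseWhile_lvl a r num hnum hr
    · have hlt : t + j < a := by omega
      rw [surpriseWhile]
      simp only [if_pos (by simp; omega : ([a, a, t + j] : List Int).sum ≠ num),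
        if_pos (by simp; omega : ([a, a, t + j] : List Int).sum < num)]
      have hmin : pyMinA [a, a, t + j] = t + j := by rw [pyMinA_triple]; omega
      have hrm : pyRemoveA [a, a, t + j] (t + j) = [a, a] :=
        pyRemoveA3_third a a (t + j) (by omega) (by omega)
      simp only [hmin, hrm]
      simp only [if_neg (by simp; omega : ¬ num < ([a, a] ++ [t + j + 1] : List Int).sum)]
      have heq : ([a, a] ++ [t + j + 1] : List Int) = [a, a, t + (j + 1)] := by simp; omega
      rw [heq]
      exact ih (j + 1) (by omega) (by omega)

-- the final breakdown A's while loop produces for one score (proof-side abbreviation)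
def finalBreakdown (num t : Int) : List Int :=
  surpriseWhile num
    (num - ([t, PySem.Int.floordiv num 3, PySem.Int.floordiv num 3] : List Int).sum).natAbs
    [t, PySem.Int.floordiv num 3, PySem.Int.floordiv num 3]

-- classification of one score, in A's terms: the two list-comprehension truthiness tests
-- on the final breakdown are exactly the closed-form conditions B uses
theorem classify (num t : Int)
    (hne : ¬ (PySem.Int.mod num 3 = 0 ∧ t ≤ PySem.Int.floordiv num 3)) :
    (((finalBreakdown num t).filter fun x => decide (x < 0 ∨ x < t - 2)) = [] ↔
        (3 * t - 2 ≤ num ∧ 1 ≤ num) ∨ (2 ≤ num ∧ (num = 3 * t - 4 ∨ num = 3 * t - 3))) ∧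
    (((finalBreakdown num t).filter fun x => decide (x < 0 ∨ x < t - 2)) = [] ∧
        ((finalBreakdown num t).filter fun x => decide (x < t - 1)) = [] ↔
      (3 * t - 2 ≤ num ∧ 1 ≤ num)) := by
  have hkey : num = 3 * PySem.Int.floordiv num 3 + PySem.Int.mod num 3 ∧
      0 ≤ PySem.Int.mod num 3 ∧ PySem.Int.mod num 3 < 3 := by
    rw [PySem.Int.floordiv_eq_ediv_of_pos (by omega), PySem.Int.mod_eq_emod_of_pos (by omega)]
    omega
  unfold finalBreakdown
  generalize hga : PySem.Int.floordiv num 3 = a at hkey hne ⊢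
  generalize hgr : PySem.Int.mod num 3 = r at hkey hne ⊢
  obtain ⟨hnum, hr0, hr2⟩ := hkey
  have hsum : ([t, a, a] : List Int).sum = t + 2 * a := by simp; ring
  by_cases hdec : a + r + 1 ≤ t
  · -- decrement case: final breakdown [t, a, 2a+r-t]
    have hb : surpriseWhile num (num - ([t, a, a] : List Int).sum).natAbs [t, a, a]
        = [t, a, 2 * a + r - t] := by
      have h0 : ([t, a, a] : List Int) = [t, a, a - 0] := by norm_num
      rw [h0]
      refine surpriseWhile_dec t a r num hnum hr0 hr2 hdec _ 0 le_rfl ?_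
      rw [show ([t, a, a - 0] : List Int).sum = t + 2 * a from by simp; ring]
      omega
    rw [hb]
    simp only [List.filter_eq_nil_iff, List.forall_mem_cons, List.not_mem_nil,
      decide_eq_true_eq, false_implies, implies_true, and_true]
    constructor <;> [skip; constructor] <;> omega
  · by_cases hta : t ≤ a
    · -- raise-then-level case; r ≥ 1 because r = 0 ∧ t ≤ a is excluded
      have hr1 : r = 1 ∨ r = 2 := by omega
      have hb : surpriseWhile num (num - ([t, a, a] : List Int).sum).natAbs [t, a, a]
          = (if r = 1 then [a, a, a + 1] else [a, a + 1, a + 1]) := by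
        by_cases htlt : t < a
        · obtain ⟨f, hf⟩ : ∃ f : Nat, (num - ([t, a, a] : List Int).sum).natAbs = f + 1 :=
            ⟨(num - ([t, a, a] : List Int).sum).natAbs - 1, by rw [hsum]; omega⟩
          rw [hf, surpriseWhile]
          simp only [if_pos (by rw [hsum]; omega : ([t, a, a] : List Int).sum ≠ num),
            if_pos (by rw [hsum]; omega : ([t, a, a] : List Int).sum < num)]
          have hmin : pyMinA [t, a, a] = t := by rw [pyMinA_triple]; omega
          simp only [hmin, pyRemoveA3_first]
          simp only [if_neg (by simp; omega : ¬ num < ([a, a] ++ [t + 1] : List Int).sum)]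
          have heq : ([a, a] ++ [t + 1] : List Int) = [a, a, t + 1] := by simp
          rw [heq]
          refine surpriseWhile_raise t a r num hnum hr1 f 1 (by omega) ?_
          have hfc : ((num - ([t, a, a] : List Int).sum).natAbs : Int) = a - t + r := by
            rw [hsum]; omega
          omega
        · have hteq : t = a := by omega
          have hfuel : (num - ([t, a, a] : List Int).sum).natAbs = r.toNat := by
            rw [hsum]; omega
          rw [hfuel, hteq]
          exact surpriseWhile_lvl a r num hnum hr1
      rcases hr1 with h | h <;> subst h
      · rw [hb, if_pos rfl]
        simp only [List.filter_eq_nil_iff, List.forall_mem_cons, List.not_mem_nil,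
          decide_eq_true_eq, false_implies, implies_true, and_true]
        constructor <;> [skip; constructor] <;> omega
      · rw [hb, if_neg (by norm_num)]
        simp only [List.filter_eq_nil_iff, List.forall_mem_cons, List.not_mem_nil,
          decide_eq_true_eq, false_implies, implies_true, and_true]
        constructor <;> [skip; constructor] <;> omega
    · -- a < t ≤ a + r
      by_cases hfz : t + 2 * a = num
      · -- the loop does not run at all: breakdown stays [t, a, a]
        have hb : surpriseWhile num (num - ([t, a, a] : List Int).sum).natAbs [t, a, a]
            = [t, a, a] := by
          have h0 : (num - ([t, a, a] : List Int).sum).natAbs = 0 := by rw [hsum]; omega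
          rw [h0, surpriseWhile]
        rw [hb]
        simp only [List.filter_eq_nil_iff, List.forall_mem_cons, List.not_mem_nil,
          decide_eq_true_eq, false_implies, implies_true, and_true]
        constructor <;> [skip; constructor] <;> omega
      · -- one increment: forces t = a + 1 and r = 2, final breakdown [a+1, a, a+1]
        have ht1 : t = a + 1 := by omega
        have hrr : r = 2 := by omega
        have hb : surpriseWhile num (num - ([t, a, a] : List Int).sum).natAbs [t, a, a]
            = [a + 1, a, a + 1] := by
          have hfuel : (num - ([t, a, a] : List Int).sum).natAbs = 1 := by rw [hsum]; omega
          rw [hfuel, surpriseWhile]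
          simp only [if_pos (by rw [hsum]; omega : ([t, a, a] : List Int).sum ≠ num),
            if_pos (by rw [hsum]; omega : ([t, a, a] : List Int).sum < num)]
          have hmin : pyMinA [t, a, a] = a := by rw [pyMinA_triple]; omega
          have hrm : pyRemoveA [t, a, a] a = [t, a] := pyRemoveA3_second t a a (by omega)
          simp only [hmin, hrm]
          simp only [if_neg (by simp; omega : ¬ num < ([t, a] ++ [a + 1] : List Int).sum)]
          rw [surpriseWhile]
          simp [ht1]
        rw [hb]
        simp only [List.filter_eq_nil_iff, List.forall_mem_cons, List.not_mem_nil,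
          decide_eq_true_eq, false_implies, implies_true, and_true]
        constructor <;> [skip; constructor] <;> omega

-- fold invariant: A carries (solution, surprisesFound), B carries (count, budget) with
-- count = solution and budget = surpriseScores - surprisesFound
theorem fold_eq (t ss : Int) (scores : List Int) :
    ∀ (sol fnd bud : Int), bud = ss - fnd →
      ((scores.foldl (fun (st : Int × Int) num =>
          if PySem.Int.mod num 3 = 0 ∧ t ≤ PySem.Int.floordiv num 3 then
            (st.1 + 1, st.2)
          else
            if ((finalBreakdown num t).filter fun x => decide (x < 0 ∨ x < t - 2)) ≠ [] then
              (st.1, st.2)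
            else if ((finalBreakdown num t).filter fun x => decide (x < t - 1)) ≠ [] then
              if st.2 ≥ ss then (st.1, st.2)
              else (st.1 + 1, st.2 + 1)
            else (st.1 + 1, st.2))
        (sol, fnd)).1 : Int) =
      ((scores.foldl (fun (st : Int × Int) num =>
          if PySem.Int.mod num 3 = 0 ∧ t ≤ PySem.Int.floordiv num 3 then
            (st.1 + 1, st.2)
          else if 3 * t - 2 ≤ num ∧ 1 ≤ num then
            (st.1 + 1, st.2)
          else if 0 < st.2 ∧ 2 ≤ num ∧ (num = 3 * t - 4 ∨ num = 3 * t - 3) then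
            (st.1 + 1, st.2 - 1)
          else
            (st.1, st.2))
        (sol, bud)).1 : Int) := by
  induction scores with
  | nil => intro sol fnd bud hb; rfl
  | cons num rest ih =>
    intro sol fnd bud hbud
    simp only [List.foldl_cons]
    by_cases heq : PySem.Int.mod num 3 = 0 ∧ t ≤ PySem.Int.floordiv num 3
    · simp only [if_pos heq]
      exact ih (sol + 1) fnd bud hbud
    · simp only [if_neg heq]
      obtain ⟨h1, h2⟩ := classify num t heq
      by_cases hnorm : 3 * t - 2 ≤ num ∧ 1 ≤ num
      · -- normal solution
        obtain ⟨hf0, hf1⟩ := h2.mpr hnorm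
        simp only [hf0, hf1, ne_eq, not_true_eq_false, if_false, if_pos hnorm]
        exact ih (sol + 1) fnd bud hbud
      · by_cases hsur : 2 ≤ num ∧ (num = 3 * t - 4 ∨ num = 3 * t - 3)
        · -- surprise candidate
          have hf0 := h1.mpr (Or.inr hsur)
          have hf1 : ¬ ((finalBreakdown num t).filter fun x => decide (x < t - 1)) = [] :=
            fun h => hnorm (h2.mp ⟨hf0, h⟩)
          simp only [hf0, ne_eq, not_true_eq_false, if_false, hf1, not_false_eq_true,
            if_true, if_neg hnorm]
          by_cases hbd : fnd ≥ ss
          · have hnb : ¬ (0 < bud ∧ 2 ≤ num ∧ (num = 3 * t - 4 ∨ num = 3 * t - 3)) := by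
              rintro ⟨h, _⟩; omega
            simp only [if_pos hbd, if_neg hnb]
            exact ih sol fnd bud hbud
          · have hyb : (0 < bud ∧ 2 ≤ num ∧ (num = 3 * t - 4 ∨ num = 3 * t - 3)) :=
              ⟨by omega, hsur⟩
            simp only [if_neg hbd, if_pos hyb]
            exact ih (sol + 1) (fnd + 1) (bud - 1) (by omega)
        · -- no solution
          have hf0 : ¬ ((finalBreakdown num t).filter fun x => decide (x < 0 ∨ x < t - 2)) = [] :=
            fun h => by
              rcases h1.mp h with h' | h'
              · exact hnorm h'
              · exact hsur h'
          have hnb : ¬ (0 < bud ∧ 2 ≤ num ∧ (num = 3 * t - 4 ∨ num = 3 * t - 3)) := by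
            rintro ⟨_, h'⟩; exact hsur h'
          simp only [hf0, ne_eq, not_false_eq_true, if_true, if_neg hnorm, if_neg hnb]
          exact ih sol fnd bud hbud

-- ===== VERDICT (by name: the statement is the Claim_ definition above) =====
theorem surprise_spec : Claim_equal_surprise := by
  intro scores threshold surpriseScores _
  show surprise scores threshold surpriseScores = surprise_alt scores threshold surpriseScores
  exact fold_eq threshold surpriseScores scores 0 0 surpriseScores (by ring)
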